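-- pv_equiv track=rewrite | github.com/bodomilan/ip2_projekat | source/fileDistanceProcessing.py | five_adic_coding
-- ===== SOURCE A (Python) =====
-- from typing import List
--
-- def five_adic_coding(s: str, cut_len=float('inf')) -> List[int]:
--     s.strip() #remove whites from end
--
--     seq = []
--     num = ''
--     i = 0
--     for c in s:
--         if c == 'C':
--             num += '1'
--         elif c == 'A':
--             num += '2'
--         elif c == 'T':
--             num += '3'
--         else:
--             num += '4'
--         i += 1
--         if i == 3:
--             i = 0
--             seq.append(int(num))
--             num = ''
--
--         if len(seq) == cut_len: #cut_len should be 78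
--             break
--     return seq
-- ===== SOURCE B (Python) =====
-- from typing import List
--
-- def five_adic_coding(s: str, cut_len=float('inf')) -> List[int]:
--     s.strip()  # kept from the original interface (no-op)
--     digit = {'C': '1', 'A': '2', 'T': '3'}
--     seq = []
--     it = iter(digit.get(c, '4') for c in s)
--     for a, b, c in zip(it, it, it):
--         if len(seq) == cut_len:
--             break
--         seq.append(int(a + b + c))
--     return seq
-- ===== Notes on version B (the rewrite author's own statement) =====
-- stated objective: simpler
-- what changed: A's single per-character state machine (digit buffer, mod-3 counter, break checks after every character) is replaced by a map of every character to its digit followed by consuming the digit stream three at a time (zip of one iterator) with one break check per triple.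
import Mathlib
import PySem

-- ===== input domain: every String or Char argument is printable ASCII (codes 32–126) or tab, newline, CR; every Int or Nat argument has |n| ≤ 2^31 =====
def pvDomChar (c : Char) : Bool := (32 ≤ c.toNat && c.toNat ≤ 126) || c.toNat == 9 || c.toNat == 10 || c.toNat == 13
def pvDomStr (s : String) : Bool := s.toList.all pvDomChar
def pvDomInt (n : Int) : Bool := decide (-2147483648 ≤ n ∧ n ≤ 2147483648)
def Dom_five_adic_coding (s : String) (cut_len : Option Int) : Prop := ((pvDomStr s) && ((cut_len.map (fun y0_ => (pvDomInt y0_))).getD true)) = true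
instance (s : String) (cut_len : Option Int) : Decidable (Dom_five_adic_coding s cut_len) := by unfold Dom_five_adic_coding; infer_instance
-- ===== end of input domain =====

-- B replaces A's per-character state machine (digit buffer + mod-3 counter + in-loop break
-- check) by a map-to-digits pass followed by grouping into triples (objective: simpler).


-- ===== PORT A =====
-- A's loop over the characters of s, carrying (seq, num, i); `break` becomes an early
-- return.  int(num) is ported as (PySem.Int.ofStr? …).getD 0, exact here because num is
-- always a nonempty string of digits when converted.  cut_len = float('inf') (Python's
-- default) is `none`: `len(seq) == inf` is always False.
-- the if/elif/else chain of A's loop body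
def fiveAdicDigitA (ch : Char) : Char :=
  if ch = 'C' then '1' else if ch = 'A' then '2' else if ch = 'T' then '3' else '4'

def fiveAdicGoA : List Char → List Int → List Char → Int → Option Int → List Int
  | [], seq, _, _, _ => seq
  | ch :: rest, seq, num, i, cl =>
      let num := num ++ [fiveAdicDigitA ch]
      let i := i + 1
      if i = 3 then
        let seq := seq ++ [(PySem.Int.ofStr? (String.ofList num)).getD 0]
        if cl = some (seq.length : Int) then seq else fiveAdicGoA rest seq [] 0 cl
      else
        if cl = some (seq.length : Int) then seq else fiveAdicGoA rest seq num i cl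

def five_adic_coding (s : String) (cut_len : Option Int) : List Int :=
  -- s.strip() in A is a no-op (value discarded)
  fiveAdicGoA s.toList [] [] 0 cut_len

-- ===== PORT B =====
-- Source B: dict.get with default '4' over the characters
def fiveAdicDigit (c : Char) : Char :=
  if c = 'C' then '1' else if c = 'A' then '2' else if c = 'T' then '3' else '4'

-- the `for a, b, c in zip(it, it, it)` loop: consume the digit stream three at a time
def fiveAdicGoB : List Char → List Int → Option Int → List Int
  | a :: b :: c :: rest, seq, cl =>
      if cl = some (seq.length : Int) then seq
      else fiveAdicGoB rest (seq ++ [(PySem.Int.ofStr? (String.ofList [a, b, c])).getD 0]) cl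
  | _, seq, _ => seq

def five_adic_coding_alt (s : String) (cut_len : Option Int) : List Int :=
  fiveAdicGoB (s.toList.map fiveAdicDigit) [] cut_len

-- ===== PRECONDITION & SPEC =====
def Spec_five_adic_coding (s : String) (cut_len : Option Int) (out : List Int) : Prop := out = five_adic_coding_alt s cut_len
instance (s : String) (cut_len : Option Int) (out : List Int) : Decidable (Spec_five_adic_coding s cut_len out) := by unfold Spec_five_adic_coding; infer_instance

-- ===== CLAIM (what is proved, stated in full; the proofs are below) =====
def Claim_equal_five_adic_coding : Prop := ∀ (s : String) (cut_len : Option Int), Dom_five_adic_coding s cut_len → Spec_five_adic_coding s cut_len (five_adic_coding s cut_len)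

-- ===== LEMMAS AND PROOFS =====

-- A's digit chain and B's dict.get-with-default map agree pointwise
theorem fiveAdicDigitA_eq (c : Char) : fiveAdicDigitA c = fiveAdicDigit c := rfl

-- B's loop returns seq unchanged as soon as the cut is reached, whatever digits remain
theorem fiveAdicGoB_cut (l : List Char) (seq : List Int) (cl : Option Int)
    (h : cl = some (seq.length : Int)) : fiveAdicGoB l seq cl = seq := by
  match l with
  | [] => rfl
  | [_] => rfl
  | [_, _] => rfl
  | _ :: _ :: _ :: _ => simp [fiveAdicGoB, h]

-- main invariant: A's loop from a triple boundary (empty buffer, counter 0) computes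
-- exactly B's triple-grouping of the digit-mapped remainder
theorem fiveAdicGoA_eq_goB :
    ∀ (l : List Char) (seq : List Int) (cl : Option Int),
      fiveAdicGoA l seq [] 0 cl = fiveAdicGoB (l.map fiveAdicDigit) seq cl
  | [], seq, cl => by simp [fiveAdicGoA, fiveAdicGoB]
  | [a], seq, cl => by
      simp only [fiveAdicGoA, fiveAdicGoB, List.map]
      norm_num
  | [a, b], seq, cl => by
      simp only [fiveAdicGoA, fiveAdicGoB, List.map]
      norm_num
  | a :: b :: c :: rest, seq, cl => by
      simp only [fiveAdicGoA, fiveAdicGoB, List.map, fiveAdicDigitA_eq, List.nil_append,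
        List.cons_append, List.append_assoc]
      norm_num
      split_ifs with h1 h2
      · rfl
      · -- A breaks right after the append; B returns the same list at its next check
        rw [fiveAdicGoB_cut _ _ _ (by simp [h2])]
      · exact fiveAdicGoA_eq_goB rest _ cl

-- ===== VERDICT (by name: the statement is the Claim_ definition above) =====
theorem five_adic_coding_spec : Claim_equal_five_adic_coding := by
  intro s cut_len _
  unfold Spec_five_adic_coding five_adic_coding five_adic_coding_alt
  exact fiveAdicGoA_eq_goB s.toList [] cut_len
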